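-- pv_equiv track=rewrite | github.com/Sunny0969/M.Paras_Portfolio | build_unified.py | pop_keyframes
-- ===== SOURCE A (Python) =====
-- def pop_keyframes(s: str) -> tuple[list[str], str]:
--     kfs: list[str] = []
--     i, n = 0, len(s)
--     out = []
--     while i < n:
--         j = s.find("@keyframes", i)
--         if j < 0:
--             out.append(s[i:])
--             break
--         out.append(s[i:j])
--         ob = s.find("{", j)
--         if ob < 0:
--             out.append(s[j:])
--             break
--         depth, k = 0, ob
--         while k < n:
--             if s[k] == "{":
--                 depth += 1
--             elif s[k] == "}":
--                 depth -= 1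
--                 if depth == 0:
--                     kfs.append(s[j : k + 1])
--                     i = k + 1
--                     break
--             k += 1
--         else:
--             out.append(s[j:])
--             break
--     return kfs, "".join(out)
-- ===== SOURCE B (Python) =====
-- def pop_keyframes(s: str) -> tuple[list[str], str]:
--     # Single character-at-a-time state machine (no str.find): modes
--     # 0 = outside, 1 = after "@keyframes" seeking '{', 2 = inside a brace-matched block.
--     kfs: list[str] = []
--     gaps: list[str] = []
--     last = 0   # where the pending output gap starts
--     j = 0      # start of the current candidate block
--     depth = 0
--     mode = 0
--     p, n = 0, len(s)
--     while p < n: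
--         c = s[p]
--         if mode == 0:
--             if s.startswith("@keyframes", p):
--                 j = p
--                 mode = 1
--         elif mode == 1:
--             if c == "{":
--                 depth = 1
--                 mode = 2
--         else:
--             if c == "{":
--                 depth += 1
--             elif c == "}":
--                 depth -= 1
--                 if depth == 0:
--                     kfs.append(s[j : p + 1])
--                     gaps.append(s[last:j])
--                     last = p + 1
--                     mode = 0
--         p += 1
--     gaps.append(s[last:])
--     return kfs, "".join(gaps)
-- ===== Notes on version B (the rewrite author's own statement) =====
-- stated objective: alternative
-- what changed: B replaces A's find-driven jumps (str.find for the keyword, str.find for the brace, then a separate depth loop) with one flat character-at-a-time state machine (modes outside/seeking-brace/in-block) that never calls find and emits output gaps only when a block closes plus one final tail.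
import Mathlib
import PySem

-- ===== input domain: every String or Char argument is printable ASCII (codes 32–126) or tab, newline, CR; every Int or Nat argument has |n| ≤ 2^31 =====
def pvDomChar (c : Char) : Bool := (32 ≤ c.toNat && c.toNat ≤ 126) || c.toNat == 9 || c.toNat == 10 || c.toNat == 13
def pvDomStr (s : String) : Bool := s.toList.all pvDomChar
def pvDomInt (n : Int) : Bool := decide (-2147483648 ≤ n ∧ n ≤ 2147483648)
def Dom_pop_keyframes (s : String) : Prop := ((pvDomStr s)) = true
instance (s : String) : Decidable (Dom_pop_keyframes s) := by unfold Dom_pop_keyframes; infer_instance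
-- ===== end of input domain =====

-- B replaces A's find-driven jumps with one flat character-at-a-time state machine
-- (outside / seeking-brace / in-block) that emits output gaps only at block close;
-- alternative decomposition, same cost as A.


-- ===== PORT A =====
def pvKw : List Char := ['@','k','e','y','f','r','a','m','e','s']

-- A's inner while loop: depth-match from k; 'some k' = break at the closing brace, 'none' = ran off the end
def scanA (cs : List Char) (depth : Int) (k : Nat) : Option Nat :=
  if h : k < cs.length then
    if cs[k] = '{' then scanA cs (depth + 1) (k + 1)
    else if cs[k] = '}' then
      (if depth - 1 = 0 then some k else scanA cs (depth - 1) (k + 1))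
    else scanA cs depth (k + 1)
  else none
termination_by cs.length - k

-- A's outer while loop; fuel bounds the iterations (i strictly increases)
def popA_loop (cs : List Char) : Nat → Nat → List (List Char) → List (List Char) → List (List Char) × List (List Char)
  | 0, _, kfs, out => (kfs, out)
  | fuel + 1, i, kfs, out =>
    if i < cs.length then
      let j := PySem.Chars.findFrom cs pvKw (i : Int) none
      if j < 0 then (kfs, out ++ [PySem.List.slice cs (some (i : Int)) none])
      else
        let jn := j.toNat
        let out1 := out ++ [PySem.List.slice cs (some (i : Int)) (some (jn : Int))]
        let ob := PySem.Chars.findFrom cs ['{'] (jn : Int) none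
        if ob < 0 then (kfs, out1 ++ [PySem.List.slice cs (some (jn : Int)) none])
        else
          match scanA cs 0 ob.toNat with
          | some k =>
            popA_loop cs fuel (k + 1)
              (kfs ++ [PySem.List.slice cs (some (jn : Int)) (some ((k + 1 : Nat) : Int))]) out1
          | none => (kfs, out1 ++ [PySem.List.slice cs (some (jn : Int)) none])
    else (kfs, out)

def pop_keyframes (s : String) : List String × String :=
  let cs := s.toList
  let r := popA_loop cs (cs.length + 1) 0 [] []
  (r.1.map (fun l => String.ofList l), String.ofList (PySem.Chars.join [] r.2))

-- ===== PORT B =====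
-- B's single while loop: one position per step; state = (mode, j, depth, last, kfs, gaps)
-- mode 0 = outside, 1 = seeking '{', 2 = inside a block
def dfaB (cs : List Char) (p : Nat) (mode : Nat) (j : Nat) (depth : Int) (last : Nat)
    (kfs gaps : List (List Char)) : List (List Char) × List (List Char) :=
  if h : p < cs.length then
    if mode = 0 then
      if pvKw.isPrefixOf (cs.drop p) then dfaB cs (p + 1) 1 p depth last kfs gaps
      else dfaB cs (p + 1) 0 j depth last kfs gaps
    else if mode = 1 then
      if cs[p] = '{' then dfaB cs (p + 1) 2 j 1 last kfs gaps
      else dfaB cs (p + 1) 1 j depth last kfs gaps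
    else
      if cs[p] = '{' then dfaB cs (p + 1) 2 j (depth + 1) last kfs gaps
      else if cs[p] = '}' then
        if depth - 1 = 0 then
          dfaB cs (p + 1) 0 j (depth - 1) (p + 1)
            (kfs ++ [PySem.List.slice cs (some (j : Int)) (some ((p + 1 : Nat) : Int))])
            (gaps ++ [PySem.List.slice cs (some (last : Int)) (some (j : Int))])
        else dfaB cs (p + 1) 2 j (depth - 1) last kfs gaps
      else dfaB cs (p + 1) 2 j depth last kfs gaps
  else (kfs, gaps ++ [PySem.List.slice cs (some (last : Int)) none])
termination_by cs.length - p

def pop_keyframes_alt (s : String) : List String × String :=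
  let cs := s.toList
  let r := dfaB cs 0 0 0 0 0 [] []
  (r.1.map (fun l => String.ofList l), String.ofList (PySem.Chars.join [] r.2))

-- ===== PRECONDITION & SPEC =====
def Spec_pop_keyframes (s : String) (out : List String × String) : Prop := out = pop_keyframes_alt s
instance (s : String) (out : List String × String) : Decidable (Spec_pop_keyframes s out) := by unfold Spec_pop_keyframes; infer_instance

-- ===== CLAIM (what is proved, stated in full; the proofs are below) =====
def Claim_equal_pop_keyframes : Prop := ∀ (s : String), Dom_pop_keyframes s → Spec_pop_keyframes s (pop_keyframes s)

-- ===== LEMMAS AND PROOFS =====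

-- span characterization shared by both ports (proof-layer only)
def spansC (cs : List Char) : Nat → Nat → List (Nat × Nat)
  | 0, _ => []
  | fuel + 1, i =>
    let j := PySem.Chars.findFrom cs pvKw (i : Int) none
    if j < 0 then []
    else
      let jn := j.toNat
      let ob := PySem.Chars.findFrom cs ['{'] (jn : Int) none
      if ob < 0 then []
      else
        match scanA cs 0 ob.toNat with
        | some k => (jn, k + 1) :: spansC cs fuel (k + 1)
        | none => []

def piecesC (cs : List Char) (pos : Nat) : List (Nat × Nat) → List (List Char)
  | [] => [PySem.List.slice cs (some (pos : Int)) none]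
  | (a, b) :: rest => PySem.List.slice cs (some (pos : Int)) (some (a : Int)) :: piecesC cs b rest

lemma join_nil_eq_flatten : ∀ (ps : List (List Char)), PySem.Chars.join [] ps = ps.flatten
  | [] => by simp [PySem.Chars.join_nil]
  | [a] => by simp [PySem.Chars.join_singleton]
  | a :: b :: rest => by
    rw [PySem.Chars.join_cons_cons, join_nil_eq_flatten (b :: rest)]
    simp

lemma scanA_some (cs : List Char) (d : Int) (k m : Nat) (h : scanA cs d k = some m) :
    k ≤ m ∧ m < cs.length := by
  fun_induction scanA cs d k <;> simp_all <;> omega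

lemma pvKw_ne_nil : pvKw ≠ [] := by decide

lemma prefix_drop_lt {sub cs : List Char} {m : Nat} (_hs : sub ≠ []) (h : sub <+: cs.drop m) :
    m < cs.length := by
  have h1 := h.length_le
  have h2 : 0 < sub.length := List.length_pos_of_ne_nil _hs
  simp [List.length_drop] at h1
  omega

lemma infix_drop_of_prefix_drop {sub cs : List Char} {t u : Nat} (htu : t ≤ u)
    (h : sub <+: cs.drop u) : sub <:+: cs.drop t := by
  have hd : cs.drop u = (cs.drop t).drop (u - t) := by
    rw [List.drop_drop]; congr 1; omega
  rw [hd] at h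
  exact h.isInfix.trans (List.drop_suffix (u - t) (cs.drop t)).isInfix

lemma gap_glue (cs : List Char) (i jn : Nat) (h : i ≤ jn) :
    PySem.List.slice cs (some (i : Int)) (some (jn : Int)) ++ cs.drop jn = cs.drop i := by
  rw [PySem.List.slice_natCast]
  have hd : cs.drop jn = (cs.drop i).drop (jn - i) := by
    rw [List.drop_drop]; congr 1; omega
  rw [hd, List.take_append_drop]

-- if the pattern is not a prefix at p, searching from p equals searching from p+1
lemma findFrom_step (cs sub : List Char) (p : Nat) (hp : p < cs.length) (_hs : sub ≠ [])
    (hnp : ¬ sub <+: cs.drop p) :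
    PySem.Chars.findFrom cs sub (p : Int) none = PySem.Chars.findFrom cs sub ((p + 1 : Nat) : Int) none := by
  by_cases hf : PySem.Chars.findFrom cs sub ((p + 1 : Nat) : Int) none = -1
  · rw [hf]
    rw [PySem.Chars.findFrom_natCast_eq_neg_one_iff cs sub (p + 1) (by omega)] at hf
    rw [PySem.Chars.findFrom_natCast_eq_neg_one_iff cs sub p (by omega)]
    intro hinf
    obtain ⟨l, r, hlr⟩ := hinf
    have hpre : sub <+: cs.drop (p + l.length) := by
      have hdd : cs.drop (p + l.length) = (cs.drop p).drop l.length := by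
        simp [List.drop_drop]
      rw [hdd, ← hlr]
      simp
    rcases Nat.eq_zero_or_pos l.length with h0 | h0
    · have hz : p + l.length = p := by omega
      rw [hz] at hpre
      exact hnp hpre
    · exact hf (infix_drop_of_prefix_drop (by omega) hpre)
  · obtain ⟨h1, h2, h3⟩ := PySem.Chars.findFrom_natCast_spec cs sub (p + 1) (by omega) hf
    set f' := PySem.Chars.findFrom cs sub ((p + 1 : Nat) : Int) none with hf'
    have hne : PySem.Chars.findFrom cs sub (p : Int) none ≠ -1 := by
      intro hno
      rw [PySem.Chars.findFrom_natCast_eq_neg_one_iff cs sub p (by omega)] at hno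
      exact hno (infix_drop_of_prefix_drop (by omega : p ≤ f'.toNat) h2)
    obtain ⟨g1, g2, g3⟩ := PySem.Chars.findFrom_natCast_spec cs sub p (by omega) hne
    set f := PySem.Chars.findFrom cs sub (p : Int) none with hfd
    have hfp : f.toNat ≠ p := fun he => hnp (he ▸ g2)
    have hge : f'.toNat ≤ f.toNat := by
      by_contra hlt
      exact h3 f.toNat (by omega) (by omega) g2
    have hle : f.toNat ≤ f'.toNat := by
      by_contra hlt
      exact g3 f'.toNat (by omega) (by omega) h2
    omega

-- mode-0 stepping = one keyword search
lemma dfaB_mode0 (cs : List Char) (p : Nat) (hp : p ≤ cs.length) :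
    ∀ j d last kfs gaps,
      dfaB cs p 0 j d last kfs gaps =
        (if PySem.Chars.findFrom cs pvKw (p : Int) none < 0 then
          (kfs, gaps ++ [PySem.List.slice cs (some (last : Int)) none])
        else
          dfaB cs ((PySem.Chars.findFrom cs pvKw (p : Int) none).toNat + 1) 1
            (PySem.Chars.findFrom cs pvKw (p : Int) none).toNat d last kfs gaps) := by
  intro j d last kfs gaps
  rw [dfaB]
  by_cases h : p < cs.length
  · rw [dif_pos h, if_pos rfl]
    by_cases hpre : pvKw.isPrefixOf (cs.drop p)
    · rw [if_pos hpre]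
      have hpre' : pvKw <+: cs.drop p := List.isPrefixOf_iff_prefix.mp hpre
      have hne : PySem.Chars.findFrom cs pvKw (p : Int) none ≠ -1 := by
        intro hno
        rw [PySem.Chars.findFrom_natCast_eq_neg_one_iff cs pvKw p (by omega)] at hno
        exact hno (infix_drop_of_prefix_drop (le_refl p) hpre')
      obtain ⟨g1, g2, g3⟩ := PySem.Chars.findFrom_natCast_spec cs pvKw p (by omega) hne
      have heq : (PySem.Chars.findFrom cs pvKw (p : Int) none).toNat = p := by
        by_contra hne2
        exact g3 p (le_refl p) (by omega) hpre'
      rw [if_neg (by omega : ¬ PySem.Chars.findFrom cs pvKw (p : Int) none < 0), heq]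
    · rw [if_neg hpre]
      rw [dfaB_mode0 cs (p + 1) (by omega) j d last kfs gaps,
        findFrom_step cs pvKw p h pvKw_ne_nil (fun hx => hpre (List.isPrefixOf_iff_prefix.mpr hx))]
  · rw [dif_neg h]
    have hm1 : PySem.Chars.findFrom cs pvKw (p : Int) none = -1 := by
      rw [PySem.Chars.findFrom_natCast_eq_neg_one_iff cs pvKw p (by omega),
        (by omega : p = cs.length)]
      simp [pvKw_ne_nil]
    rw [hm1, if_pos (by norm_num : (-1 : Int) < 0)]
termination_by cs.length - p

lemma single_prefix_drop (cs : List Char) (c : Char) (p : Nat) (h : p < cs.length) :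
    [c] <+: cs.drop p ↔ cs[p] = c := by
  rw [List.drop_eq_getElem_cons h]
  constructor
  · rintro ⟨t, ht⟩
    simp only [List.singleton_append] at ht
    injection ht with h1 _
    exact h1.symm
  · intro hc
    exact ⟨cs.drop (p + 1), by rw [hc]; rfl⟩

-- mode-1 stepping = one '{' search
lemma dfaB_mode1 (cs : List Char) (p : Nat) (hp : p ≤ cs.length) :
    ∀ j d last kfs gaps,
      dfaB cs p 1 j d last kfs gaps =
        (if PySem.Chars.findFrom cs ['{'] (p : Int) none < 0 then
          (kfs, gaps ++ [PySem.List.slice cs (some (last : Int)) none])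
        else
          dfaB cs ((PySem.Chars.findFrom cs ['{'] (p : Int) none).toNat + 1) 2 j 1 last kfs gaps) := by
  intro j d last kfs gaps
  rw [dfaB]
  by_cases h : p < cs.length
  · rw [dif_pos h, if_neg (by decide : ¬ (1 : Nat) = 0), if_pos rfl]
    by_cases hc : cs[p] = '{'
    · rw [if_pos hc]
      have hpre' : ['{'] <+: cs.drop p := (single_prefix_drop cs '{' p h).mpr hc
      have hne : PySem.Chars.findFrom cs ['{'] (p : Int) none ≠ -1 := by
        intro hno
        rw [PySem.Chars.findFrom_natCast_eq_neg_one_iff cs ['{'] p (by omega)] at hno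
        exact hno (infix_drop_of_prefix_drop (le_refl p) hpre')
      obtain ⟨g1, g2, g3⟩ := PySem.Chars.findFrom_natCast_spec cs ['{'] p (by omega) hne
      have heq : (PySem.Chars.findFrom cs ['{'] (p : Int) none).toNat = p := by
        by_contra hne2
        exact g3 p (le_refl p) (by omega) hpre'
      rw [if_neg (by omega : ¬ PySem.Chars.findFrom cs ['{'] (p : Int) none < 0), heq]
    · rw [if_neg hc]
      rw [dfaB_mode1 cs (p + 1) (by omega) j d last kfs gaps,
        findFrom_step cs ['{'] p h (by decide)
          (fun hx => hc ((single_prefix_drop cs '{' p h).mp hx))]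
  · rw [dif_neg h]
    have hm1 : PySem.Chars.findFrom cs ['{'] (p : Int) none = -1 := by
      rw [PySem.Chars.findFrom_natCast_eq_neg_one_iff cs ['{'] p (by omega),
        (by omega : p = cs.length)]
      simp
    rw [hm1, if_pos (by norm_num : (-1 : Int) < 0)]
termination_by cs.length - p

-- mode-2 stepping = A's depth scan
lemma dfaB_mode2 (cs : List Char) (p : Nat) :
    ∀ j d last kfs gaps,
      dfaB cs p 2 j d last kfs gaps =
        (match scanA cs d p with
        | none => (kfs, gaps ++ [PySem.List.slice cs (some (last : Int)) none])
        | some m =>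
          dfaB cs (m + 1) 0 j 0 (m + 1)
            (kfs ++ [PySem.List.slice cs (some (j : Int)) (some ((m + 1 : Nat) : Int))])
            (gaps ++ [PySem.List.slice cs (some (last : Int)) (some (j : Int))])) := by
  intro j d last kfs gaps
  rw [dfaB, scanA]
  by_cases h : p < cs.length
  · rw [dif_pos h, dif_pos h, if_neg (by decide : ¬ (2 : Nat) = 0), if_neg (by decide : ¬ (2 : Nat) = 1)]
    by_cases h1 : cs[p] = '{'
    · rw [if_pos h1, if_pos h1]
      exact dfaB_mode2 cs (p + 1) j (d + 1) last kfs gaps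
    · rw [if_neg h1, if_neg h1]
      by_cases h2 : cs[p] = '}'
      · rw [if_pos h2, if_pos h2]
        by_cases hd : d - 1 = 0
        · rw [if_pos hd, if_pos hd, hd]
        · rw [if_neg hd, if_neg hd]
          exact dfaB_mode2 cs (p + 1) j (d - 1) last kfs gaps
      · rw [if_neg h2, if_neg h2]
        exact dfaB_mode2 cs (p + 1) j d last kfs gaps
  · rw [dif_neg h, dif_neg h]
termination_by cs.length - p

-- B equals the span characterization
lemma dfaB_eq (cs : List Char) (fuel : Nat) :
    ∀ i j kfs gaps, i ≤ cs.length → cs.length - i < fuel →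
      (dfaB cs i 0 j 0 i kfs gaps).1
        = kfs ++ (spansC cs fuel i).map
            (fun p => PySem.List.slice cs (some (p.1 : Int)) (some (p.2 : Int)))
      ∧ (dfaB cs i 0 j 0 i kfs gaps).2.flatten
        = gaps.flatten ++ (piecesC cs i (spansC cs fuel i)).flatten := by
  induction fuel with
  | zero => intro i j kfs gaps _ h2; exact absurd h2 (Nat.not_lt_zero _)
  | succ fuel ih =>
    intro i j kfs gaps hi hf
    rw [dfaB_mode0 cs i hi, spansC]
    by_cases hj : PySem.Chars.findFrom cs pvKw (i : Int) none < 0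
    · simp [hj, piecesC]
    · simp only [hj, if_neg, not_false_iff]
      have hjne : PySem.Chars.findFrom cs pvKw (i : Int) none ≠ -1 := by omega
      obtain ⟨hij, hpre, -⟩ := PySem.Chars.findFrom_natCast_spec cs pvKw i (by omega) hjne
      set jf := PySem.Chars.findFrom cs pvKw (i : Int) none with hjdef
      have hjlt : jf.toNat < cs.length := prefix_drop_lt pvKw_ne_nil hpre
      have hij : i ≤ jf.toNat := by omega
      -- cs[jf.toNat] = '@', so the '{' search from jf.toNat equals the one from jf.toNat + 1
      have hat : cs[jf.toNat] = '@' := by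
        obtain ⟨r, hr⟩ := hpre
        rw [List.drop_eq_getElem_cons hjlt] at hr
        simp only [pvKw, List.cons_append] at hr
        injection hr with h1 _
        exact h1.symm
      have hnb : ¬ ['{'] <+: cs.drop jf.toNat := fun hx => by
        have := (single_prefix_drop cs '{' jf.toNat hjlt).mp hx
        rw [hat] at this
        exact absurd this (by decide)
      have hfstep := findFrom_step cs ['{'] jf.toNat hjlt (by decide) hnb
      rw [dfaB_mode1 cs (jf.toNat + 1) (by omega), ← hfstep]
      by_cases hob : PySem.Chars.findFrom cs ['{'] (jf.toNat : Int) none < 0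
      · simp only [hob, if_pos]
        refine ⟨by simp, ?_⟩
        simp [piecesC]
      · simp only [hob, if_neg, not_false_iff]
        have hobne : PySem.Chars.findFrom cs ['{'] (jf.toNat : Int) none ≠ -1 := by omega
        obtain ⟨hjo, hopre, -⟩ :=
          PySem.Chars.findFrom_natCast_spec cs ['{'] jf.toNat (by omega) hobne
        set ob := PySem.Chars.findFrom cs ['{'] (jf.toNat : Int) none with hobdef
        have hoblt : ob.toNat < cs.length := prefix_drop_lt (by decide) hopre
        have hjob : jf.toNat ≤ ob.toNat := by omega
        have hbr : cs[ob.toNat] = '{' := (single_prefix_drop cs '{' ob.toNat hoblt).mp hopre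
        -- A's scanA from ob with depth 0 takes one '{' step
        have hscan0 : scanA cs 0 ob.toNat = scanA cs 1 (ob.toNat + 1) := by
          rw [scanA]
          simp [hoblt, hbr]
        rw [dfaB_mode2 cs (ob.toNat + 1), ← hscan0]
        cases hscan : scanA cs 0 ob.toNat with
        | none =>
          refine ⟨by simp, ?_⟩
          simp [piecesC]
        | some m =>
          obtain ⟨hkm, hmlt⟩ := scanA_some cs 0 ob.toNat m hscan
          obtain ⟨ih1, ih2⟩ := ih (m + 1) jf.toNat
            (kfs ++ [PySem.List.slice cs (some (jf.toNat : Int)) (some ((m + 1 : Nat) : Int))])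
            (gaps ++ [PySem.List.slice cs (some (i : Int)) (some (jf.toNat : Int))])
            (by omega) (by omega)
          refine ⟨?_, ?_⟩
          · rw [ih1, List.map_cons]
            simp only [List.append_assoc, List.singleton_append]
          · rw [ih2]
            simp only [piecesC, List.flatten_append, List.flatten_cons, List.flatten_nil,
              List.append_nil, List.append_assoc]

-- A equals the span characterization
lemma popA_loop_eq (cs : List Char) (fuel : Nat) :
    ∀ i kfs out, i ≤ cs.length → cs.length - i < fuel →
      (popA_loop cs fuel i kfs out).1
        = kfs ++ (spansC cs fuel i).map
            (fun p => PySem.List.slice cs (some (p.1 : Int)) (some (p.2 : Int)))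
      ∧ (popA_loop cs fuel i kfs out).2.flatten
        = out.flatten ++ (piecesC cs i (spansC cs fuel i)).flatten := by
  induction fuel with
  | zero => intro i kfs out _ h2; exact absurd h2 (Nat.not_lt_zero _)
  | succ fuel ih =>
    intro i kfs out hi hf
    rw [popA_loop, spansC]
    by_cases hlt : i < cs.length
    · simp only [hlt, if_pos]
      by_cases hj : PySem.Chars.findFrom cs pvKw (i : Int) none < 0
      · simp only [hj, if_pos]
        simp [piecesC, PySem.List.slice_from_natCast]
      · simp only [hj, if_neg, not_false_iff]
        have hjne : PySem.Chars.findFrom cs pvKw (i : Int) none ≠ -1 := by omega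
        obtain ⟨hij, hpre, -⟩ := PySem.Chars.findFrom_natCast_spec cs pvKw i (by omega) hjne
        set j := PySem.Chars.findFrom cs pvKw (i : Int) none with hjdef
        have hijn : i ≤ j.toNat := by omega
        have hjlt : j.toNat < cs.length := prefix_drop_lt pvKw_ne_nil hpre
        by_cases hob : PySem.Chars.findFrom cs ['{'] (j.toNat : Int) none < 0
        · simp only [hob, if_pos]
          refine ⟨by simp, ?_⟩
          simp only [piecesC, List.flatten_cons, List.flatten_nil, List.flatten_append,
            List.append_nil, List.append_assoc, PySem.List.slice_from_natCast]
          rw [gap_glue cs i j.toNat hijn]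
        · simp only [hob, if_neg, not_false_iff]
          have hobne : PySem.Chars.findFrom cs ['{'] (j.toNat : Int) none ≠ -1 := by omega
          obtain ⟨hjo, -, -⟩ := PySem.Chars.findFrom_natCast_spec cs ['{'] j.toNat (by omega) hobne
          cases hscan : scanA cs 0 (PySem.Chars.findFrom cs ['{'] (j.toNat : Int) none).toNat with
          | none =>
            refine ⟨by simp, ?_⟩
            simp only [piecesC, List.flatten_cons, List.flatten_nil, List.flatten_append,
              List.append_nil, List.append_assoc, PySem.List.slice_from_natCast]
            rw [gap_glue cs i j.toNat hijn]
          | some m =>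
            obtain ⟨hkm, hmlt⟩ := scanA_some cs 0 _ m hscan
            obtain ⟨ih1, ih2⟩ := ih (m + 1)
              (kfs ++ [PySem.List.slice cs (some (j.toNat : Int)) (some ((m + 1 : Nat) : Int))])
              (out ++ [PySem.List.slice cs (some (i : Int)) (some (j.toNat : Int))])
              (by omega) (by omega)
            constructor
            · rw [List.map_cons, ih1]
              simp only [List.append_assoc, List.singleton_append]
            · rw [ih2]
              simp only [piecesC, List.flatten_append, List.flatten_cons, List.flatten_nil,
                List.append_nil, List.append_assoc]
    · simp only [hlt, if_neg, not_false_iff, if_false]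
      have hieq : i = cs.length := by omega
      have hjneg : PySem.Chars.findFrom cs pvKw (i : Int) none = -1 := by
        rw [PySem.Chars.findFrom_natCast_eq_neg_one_iff cs pvKw i (by omega), hieq]
        simp [pvKw_ne_nil]
      have hneg : PySem.Chars.findFrom cs pvKw (i : Int) none < 0 := by omega
      simp only [hneg, if_pos]
      simp [piecesC, PySem.List.slice_from_natCast, hieq]

-- ===== VERDICT (by name: the statement is the Claim_ definition above) =====
theorem pop_keyframes_spec : Claim_equal_pop_keyframes := by
  intro s _
  unfold Spec_pop_keyframes pop_keyframes pop_keyframes_alt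
  obtain ⟨a1, a2⟩ := popA_loop_eq s.toList (s.toList.length + 1) 0 [] [] (by omega) (by omega)
  obtain ⟨b1, b2⟩ := dfaB_eq s.toList (s.toList.length + 1) 0 0 [] [] (by omega) (by omega)
  have h1 : (popA_loop s.toList (s.toList.length + 1) 0 [] []).1
      = (dfaB s.toList 0 0 0 0 0 [] []).1 := by rw [a1, b1]
  have h2 : (popA_loop s.toList (s.toList.length + 1) 0 [] []).2.flatten
      = (dfaB s.toList 0 0 0 0 0 [] []).2.flatten := by rw [a2, b2]
  simp only []
  exact Prod.ext (by rw [h1])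
    (by rw [join_nil_eq_flatten, join_nil_eq_flatten, h2])
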